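-- pv_equiv track=rewrite | github.com/h-mayorquin/capacity_code | functions.py | produce_pairs_with_constant_number_of_patterns
-- ===== SOURCE A (Python) =====
-- from math import ceil, floor
--
-- def produce_pairs_with_constant_number_of_patterns(n_patterns):
--     sl_old = n_patterns
--     ns = 1
--     pairs = []
--     while(sl_old > 1):
--         sl_new = floor(n_patterns / ns)
--         if sl_new != sl_old:
--             pairs.append((ns - 1, sl_old, sl_old * (ns - 1)))
--         ns += 1
--         sl_old = sl_new
--
--     return pairs
-- ===== SOURCE B (Python) =====
-- from math import isqrt
--
-- def produce_pairs_with_constant_number_of_patterns(n_patterns):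
--     # sqrt-split divisor enumeration: quotients q = n_patterns // k come in
--     # O(sqrt n) distinct values; list the large quotients (> isqrt) via their
--     # unique index d <= isqrt, and the small quotients 2..isqrt directly.
--     if n_patterns < 2:
--         return []
--     n = n_patterns
--     s = isqrt(n)
--     large = [(d, n // d, (n // d) * d) for d in range(1, s + 1) if n // d > s]
--     small = [(n // q, q, q * (n // q)) for q in range(s, 1, -1)]
--     return large + small
-- ===== Notes on version B (the rewrite author's own statement) =====
-- stated objective: faster
-- what changed: Replaces A's one-at-a-time O(n) scan over divisors with a sqrt-split enumeration: two range comprehensions list the O(sqrt n) distinct quotients directly (large quotients indexed by d <= isqrt(n), small quotients 2..isqrt(n) by value) and concatenate them.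
import Mathlib
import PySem

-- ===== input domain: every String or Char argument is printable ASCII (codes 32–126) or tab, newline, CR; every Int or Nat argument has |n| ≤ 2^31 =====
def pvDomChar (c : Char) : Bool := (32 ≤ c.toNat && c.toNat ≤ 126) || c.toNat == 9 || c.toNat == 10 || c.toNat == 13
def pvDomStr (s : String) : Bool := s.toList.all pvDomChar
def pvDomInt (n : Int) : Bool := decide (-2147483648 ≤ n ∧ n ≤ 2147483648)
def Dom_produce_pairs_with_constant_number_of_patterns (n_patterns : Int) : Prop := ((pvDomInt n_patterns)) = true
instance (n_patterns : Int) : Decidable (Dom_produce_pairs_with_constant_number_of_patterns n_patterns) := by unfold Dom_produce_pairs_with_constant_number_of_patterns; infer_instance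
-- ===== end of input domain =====

-- B replaces A's one-at-a-time scan over every divisor with a sqrt-split enumeration of
-- the O(sqrt n) distinct quotients (two range comprehensions, concatenated); same value,
-- asymptotically faster (measured).

-- ===== PORT A =====
-- A's while-loop, ported with a fuel argument that only makes the recursion total;
-- n.toNat + 2 exceeds the number of iterations (ns grows by 1 each step and the loop
-- stops once floor(n/ns) ≤ 1), so the fuel never runs out on the real run.
-- Python's `floor(n_patterns / ns)` (float true division, then floor) equals integer
-- floor division exactly for |n_patterns| ≤ 2^31 (< 2^53), i.e. on all of Dom.
def pvLoopA (n : Int) : Nat → Int → Int → List (List Int) → List (List Int)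
  | 0, _, _, pairs => pairs
  | fuel + 1, ns, sl_old, pairs =>
    if sl_old > 1 then
      let sl_new := PySem.Int.floordiv n ns
      pvLoopA n fuel (ns + 1) sl_new
        (if sl_new ≠ sl_old then pairs ++ [[ns - 1, sl_old, sl_old * (ns - 1)]] else pairs)
    else pairs

def produce_pairs_with_constant_number_of_patterns (n_patterns : Int) : List (List Int) :=
  pvLoopA n_patterns (n_patterns.toNat + 2) 1 n_patterns []

-- ===== PORT B =====
-- Source B: guard, s = isqrt(n) (math.isqrt ported as Nat.sqrt, exact for n ≥ 0), one
-- filtered comprehension for the large quotients and one comprehension for the small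
-- ones, concatenated.
def produce_pairs_with_constant_number_of_patterns_alt (n_patterns : Int) : List (List Int) :=
  if n_patterns < 2 then []
  else
    let n := n_patterns
    let s : Int := (Nat.sqrt n.toNat : Int)
    let large := (PySem.List.pyRange 1 (s + 1) 1).filterMap (fun d =>
      if PySem.Int.floordiv n d > s then
        some [d, PySem.Int.floordiv n d, (PySem.Int.floordiv n d) * d]
      else none)
    let small := (PySem.List.pyRange s 1 (-1)).map (fun q =>
      [PySem.Int.floordiv n q, q, q * PySem.Int.floordiv n q])
    large ++ small

-- ===== PRECONDITION & SPEC =====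
def Spec_produce_pairs_with_constant_number_of_patterns (n_patterns : Int) (out : List (List Int)) : Prop := out = produce_pairs_with_constant_number_of_patterns_alt n_patterns
instance (n_patterns : Int) (out : List (List Int)) : Decidable (Spec_produce_pairs_with_constant_number_of_patterns n_patterns out) := by unfold Spec_produce_pairs_with_constant_number_of_patterns; infer_instance

-- ===== CLAIM (what is proved, stated in full; the proofs are below) =====
def Claim_equal_produce_pairs_with_constant_number_of_patterns : Prop := ∀ (n_patterns : Int), Dom_produce_pairs_with_constant_number_of_patterns n_patterns → Spec_produce_pairs_with_constant_number_of_patterns n_patterns (produce_pairs_with_constant_number_of_patterns n_patterns)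

-- ===== LEMMAS AND PROOFS =====

-- Proof-side intermediate: the "jump" loop that hops from one quotient block to the
-- next.  A's loop is first shown equal to it (pvMain), and it is then unrolled into
-- B's two comprehensions (pvJumpInv).
def pvJump (n : Int) : Nat → Int → List (List Int) → List (List Int)
  | 0, _, pairs => pairs
  | fuel + 1, k, pairs =>
    if 1 < PySem.Int.floordiv n k then
      let q := PySem.Int.floordiv n k
      let kmax := PySem.Int.floordiv n q
      pvJump n fuel (kmax + 1) (pairs ++ [[kmax, q, q * kmax]])
    else pairs

theorem pvLoopA_succ (n : Int) (fuel : Nat) (ns sl_old : Int) (pairs : List (List Int)) :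
    pvLoopA n (fuel + 1) ns sl_old pairs =
      if sl_old > 1 then
        pvLoopA n fuel (ns + 1) (PySem.Int.floordiv n ns)
          (if PySem.Int.floordiv n ns ≠ sl_old then
            pairs ++ [[ns - 1, sl_old, sl_old * (ns - 1)]] else pairs)
      else pairs := rfl

theorem pv_fd_one (n : Int) : PySem.Int.floordiv n 1 = n := by
  simp [PySem.Int.floordiv, Int.fdiv_one]

theorem pv_fd_antitone {n a b : Int} (hn : 0 ≤ n) (ha : 0 < a) (hab : a ≤ b) :
    PySem.Int.floordiv n b ≤ PySem.Int.floordiv n a := by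
  have hb : 0 < b := lt_of_lt_of_le ha hab
  have h0 : 0 ≤ PySem.Int.floordiv n b :=
    (PySem.Int.le_floordiv_iff_mul_le hb).mpr (by simpa)
  have hbb : PySem.Int.floordiv n b * b ≤ n :=
    (PySem.Int.le_floordiv_iff_mul_le hb).mp le_rfl
  refine (PySem.Int.le_floordiv_iff_mul_le ha).mpr ?_
  calc PySem.Int.floordiv n b * a ≤ PySem.Int.floordiv n b * b :=
        mul_le_mul_of_nonneg_left hab h0
    _ ≤ n := hbb

-- block facts: for q = n // k ≥ 2 and kmax = n // q, kmax is the last index of the block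
theorem pv_le_kmax {n k : Int} (hk : 0 < k) (hq : 2 ≤ PySem.Int.floordiv n k) :
    k ≤ PySem.Int.floordiv n (PySem.Int.floordiv n k) := by
  have hqpos : 0 < PySem.Int.floordiv n k := by omega
  have hqk : PySem.Int.floordiv n k * k ≤ n :=
    (PySem.Int.le_floordiv_iff_mul_le hk).mp le_rfl
  exact (PySem.Int.le_floordiv_iff_mul_le hqpos).mpr (by linarith [mul_comm k (PySem.Int.floordiv n k)])

theorem pv_fd_kmax {n k : Int} (hn : 0 ≤ n) (hk : 0 < k) (hq : 2 ≤ PySem.Int.floordiv n k) :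
    PySem.Int.floordiv n (PySem.Int.floordiv n (PySem.Int.floordiv n k)) = PySem.Int.floordiv n k := by
  have hqpos : 0 < PySem.Int.floordiv n k := by omega
  have hkm : k ≤ PySem.Int.floordiv n (PySem.Int.floordiv n k) := pv_le_kmax hk hq
  have hkmpos : 0 < PySem.Int.floordiv n (PySem.Int.floordiv n k) := lt_of_lt_of_le hk hkm
  refine le_antisymm (pv_fd_antitone hn hk hkm) ?_
  have hmul : PySem.Int.floordiv n (PySem.Int.floordiv n k) * PySem.Int.floordiv n k ≤ n :=
    (PySem.Int.le_floordiv_iff_mul_le hqpos).mp le_rfl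
  exact (PySem.Int.le_floordiv_iff_mul_le hkmpos).mpr
    (by linarith [mul_comm (PySem.Int.floordiv n k) (PySem.Int.floordiv n (PySem.Int.floordiv n k))])

theorem pv_fd_past_kmax {n k : Int} (hk : 0 < k) (hq : 2 ≤ PySem.Int.floordiv n k) :
    PySem.Int.floordiv n (PySem.Int.floordiv n (PySem.Int.floordiv n k) + 1) < PySem.Int.floordiv n k := by
  have hqpos : 0 < PySem.Int.floordiv n k := by omega
  have hkm : k ≤ PySem.Int.floordiv n (PySem.Int.floordiv n k) := pv_le_kmax hk hq
  have hkm1 : 0 < PySem.Int.floordiv n (PySem.Int.floordiv n k) + 1 := by omega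
  have hlt : n < (PySem.Int.floordiv n (PySem.Int.floordiv n k) + 1) * PySem.Int.floordiv n k :=
    (PySem.Int.floordiv_lt_iff_lt_mul hqpos).mp (by omega)
  exact (PySem.Int.floordiv_lt_iff_lt_mul hkm1).mpr
    (by linarith [mul_comm (PySem.Int.floordiv n (PySem.Int.floordiv n k) + 1) (PySem.Int.floordiv n k)])

theorem pv_fd_sandwich {n k j : Int} (hn : 0 ≤ n) (hk : 0 < k)
    (hq : 2 ≤ PySem.Int.floordiv n k) (h1 : k ≤ j)
    (h2 : j ≤ PySem.Int.floordiv n (PySem.Int.floordiv n k)) :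
    PySem.Int.floordiv n j = PySem.Int.floordiv n k := by
  have hjpos : 0 < j := lt_of_lt_of_le hk h1
  refine le_antisymm (pv_fd_antitone hn hk h1) ?_
  calc PySem.Int.floordiv n k
      = PySem.Int.floordiv n (PySem.Int.floordiv n (PySem.Int.floordiv n k)) := (pv_fd_kmax hn hk hq).symm
    _ ≤ PySem.Int.floordiv n j := pv_fd_antitone hn hjpos h2

-- within one block, the jump step does not depend on where in the block k is
theorem pvJump_congr (n : Int) (f : Nat) (k k' : Int) (pairs : List (List Int))
    (h : PySem.Int.floordiv n k = PySem.Int.floordiv n k') :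
    pvJump n (f + 1) k pairs = pvJump n (f + 1) k' pairs := by
  simp only [pvJump, ← h]

-- bridge 1: A's loop at divisor position ns (carrying sl_old = n // (ns-1)) computes
-- exactly what the jump loop computes from position ns - 1, given enough fuel
theorem pvMain (n : Int) (hn : 2 ≤ n) :
    ∀ (fa : Nat) (ns : Int) (fb : Nat) (pairs : List (List Int)),
      2 ≤ ns → n + 3 - ns ≤ (fa : Int) → n + 2 - ns ≤ (fb : Int) →
      pvLoopA n fa ns (PySem.Int.floordiv n (ns - 1)) pairs = pvJump n fb (ns - 1) pairs := by
  intro fa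
  induction fa with
  | zero =>
    intro ns fb pairs hns hfa hfb
    have hbig : n + 3 ≤ ns := by push_cast at hfa; omega
    have hpos : 0 < ns - 1 := by omega
    have hlt : PySem.Int.floordiv n (ns - 1) < 2 :=
      (PySem.Int.floordiv_lt_iff_lt_mul hpos).mpr (by nlinarith)
    cases fb with
    | zero => simp [pvLoopA, pvJump]
    | succ f => simp [pvLoopA, pvJump, if_neg (by omega : ¬ 1 < PySem.Int.floordiv n (ns - 1))]
  | succ fa IH =>
    intro ns fb pairs hns hfa hfb
    by_cases hs : 1 < PySem.Int.floordiv n (ns - 1)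
    · -- inside a block of value q = n // (ns-1) ≥ 2
      have hn0 : (0:Int) ≤ n := by omega
      have hk0 : (0:Int) < ns - 1 := by omega
      have hq : 2 ≤ PySem.Int.floordiv n (ns - 1) := by omega
      have hkm : ns - 1 ≤ PySem.Int.floordiv n (PySem.Int.floordiv n (ns - 1)) := pv_le_kmax hk0 hq
      have h2k : 2 * (ns - 1) ≤ n := by
        have := (PySem.Int.le_floordiv_iff_mul_le hk0).mp hq; linarith
      obtain ⟨f, rfl⟩ : ∃ f, fb = f + 1 := by
        cases fb with
        | zero => exfalso; simp at hfb; omega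
        | succ f => exact ⟨f, rfl⟩
      have hcase : ns ≤ PySem.Int.floordiv n (PySem.Int.floordiv n (ns - 1)) ∨
          ns = PySem.Int.floordiv n (PySem.Int.floordiv n (ns - 1)) + 1 := by omega
      rcases hcase with hle | heq
      · -- ns still inside the block: A makes a silent step
        have hdns : PySem.Int.floordiv n ns = PySem.Int.floordiv n (ns - 1) :=
          pv_fd_sandwich hn0 hk0 hq (by omega) hle
        have step : pvLoopA n (fa + 1) ns (PySem.Int.floordiv n (ns - 1)) pairs
            = pvLoopA n fa (ns + 1) (PySem.Int.floordiv n ns) pairs := by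
          simp only [pvLoopA, if_pos hs]
          rw [if_neg (by rw [hdns]; exact fun h => h rfl)]
        rw [step, show PySem.Int.floordiv n ns = PySem.Int.floordiv n ((ns + 1) - 1) by
              rw [Int.add_sub_cancel]]
        rw [IH (ns + 1) (f + 1) pairs (by omega) (by push_cast at hfa ⊢; omega)
              (by push_cast at hfb ⊢; omega)]
        rw [Int.add_sub_cancel]
        exact (pvJump_congr n f (ns - 1) ns pairs (by rw [hdns])).symm
      · -- ns is just past the block: A records the pair, exactly as the jump does
        have hlt : PySem.Int.floordiv n ns < PySem.Int.floordiv n (ns - 1) := by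
          have := pv_fd_past_kmax hk0 hq; rw [← heq] at this; exact this
        have step : pvLoopA n (fa + 1) ns (PySem.Int.floordiv n (ns - 1)) pairs
            = pvLoopA n fa (ns + 1) (PySem.Int.floordiv n ns)
                (pairs ++ [[ns - 1, PySem.Int.floordiv n (ns - 1),
                            PySem.Int.floordiv n (ns - 1) * (ns - 1)]]) := by
          simp only [pvLoopA, if_pos hs]
          rw [if_pos (by omega)]
        rw [step, show PySem.Int.floordiv n ns = PySem.Int.floordiv n ((ns + 1) - 1) by
              rw [Int.add_sub_cancel]]
        rw [IH (ns + 1) f _ (by omega) (by push_cast at hfa ⊢; omega)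
              (by push_cast at hfb ⊢; omega)]
        have hB : pvJump n (f + 1) (ns - 1) pairs
            = pvJump n f (PySem.Int.floordiv n (PySem.Int.floordiv n (ns - 1)) + 1)
                (pairs ++ [[PySem.Int.floordiv n (PySem.Int.floordiv n (ns - 1)),
                            PySem.Int.floordiv n (ns - 1),
                            PySem.Int.floordiv n (ns - 1) *
                              PySem.Int.floordiv n (PySem.Int.floordiv n (ns - 1))]]) := by
          simp only [pvJump, if_pos hs]
        rw [hB, Int.add_sub_cancel,
            show PySem.Int.floordiv n (PySem.Int.floordiv n (ns - 1)) = ns - 1 by omega,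
            Int.sub_add_cancel]
    · -- loop is over on both sides
      cases fb with
      | zero => simp [pvLoopA, pvJump, if_neg hs]
      | succ f => simp [pvLoopA, pvJump, if_neg hs]

-- the two comprehensions of B, as functions of their lower bounds
def pvLarge (n s k : Int) : List (List Int) :=
  (PySem.List.pyRange k (s + 1) 1).filterMap (fun d =>
    if PySem.Int.floordiv n d > s then
      some [d, PySem.Int.floordiv n d, (PySem.Int.floordiv n d) * d]
    else none)

def pvSmall (n t : Int) : List (List Int) :=
  (PySem.List.pyRange t 1 (-1)).map (fun q =>
    [PySem.Int.floordiv n q, q, q * PySem.Int.floordiv n q])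

-- for a large quotient q = n//k > sqrt n, the block is a singleton: n // q = k
theorem pv_fd_inv_large {n s k : Int} (hk : 0 < k) (hs0 : 0 ≤ s)
    (hss : n < (s + 1) * (s + 1)) (hq : s < PySem.Int.floordiv n k) :
    PySem.Int.floordiv n (PySem.Int.floordiv n k) = k := by
  have hqpos : 0 < PySem.Int.floordiv n k := by omega
  -- k ≤ s
  have hks : k ≤ s := by
    by_contra h
    have hk1 : s + 1 ≤ k := by omega
    have : PySem.Int.floordiv n k * k ≤ n := (PySem.Int.le_floordiv_iff_mul_le hk).mp le_rfl
    nlinarith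
  have hq2 : 2 ≤ PySem.Int.floordiv n k := by omega
  have hle : k ≤ PySem.Int.floordiv n (PySem.Int.floordiv n k) := pv_le_kmax hk hq2
  -- upper: n < (k+1) * q since n = q*k + r with r < k ≤ s < q
  have hup : PySem.Int.floordiv n (PySem.Int.floordiv n k) < k + 1 := by
    refine (PySem.Int.floordiv_lt_iff_lt_mul hqpos).mpr ?_
    have hdm := PySem.Int.floordiv_mul_add_mod n k
    have hr : PySem.Int.mod n k < k := PySem.Int.mod_lt n hk
    nlinarith [PySem.Int.mod_nonneg n hk]
  omega

-- for a small quotient 2 ≤ q ≤ sqrt n: the next block's value is exactly q - 1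
theorem pv_fd_next_small {n s q : Int} (hq2 : 2 ≤ q) (hqs : q ≤ s) (hss : s * s ≤ n) :
    PySem.Int.floordiv n (PySem.Int.floordiv n q + 1) = q - 1 := by
  have hqpos : 0 < q := by omega
  have hm : q ≤ PySem.Int.floordiv n q :=
    (PySem.Int.le_floordiv_iff_mul_le hqpos).mpr (by nlinarith)
  have hmpos : 0 < PySem.Int.floordiv n q + 1 := by omega
  have hdm := PySem.Int.floordiv_mul_add_mod n q
  have hr : PySem.Int.mod n q < q := PySem.Int.mod_lt n hqpos
  have hr0 : 0 ≤ PySem.Int.mod n q := PySem.Int.mod_nonneg n hqpos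
  rw [PySem.Int.floordiv_eq_iff_of_pos hmpos]
  constructor
  · nlinarith
  · nlinarith

-- bridge 2: the jump loop, from any position k ≥ 1, produces B's two comprehensions
theorem pvJumpInv (n s : Int) (hn : 2 ≤ n) (hs1 : 1 ≤ s) (hss : s * s ≤ n)
    (hs2 : n < (s + 1) * (s + 1)) :
    ∀ (fuel : Nat) (k : Int) (pairs : List (List Int)), 1 ≤ k → n + 2 - k ≤ (fuel : Int) →
      pvJump n fuel k pairs = pairs ++ pvLarge n s k ++ pvSmall n (min (PySem.Int.floordiv n k) s) := by
  intro fuel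
  have hn0 : (0:Int) ≤ n := by omega
  induction fuel with
  | zero =>
    intro k pairs hk hfuel
    have hkbig : n + 2 ≤ k := by push_cast at hfuel; omega
    have hk0 : (0:Int) < k := by omega
    have hq0 : PySem.Int.floordiv n k = 0 := by
      have h1 : PySem.Int.floordiv n k < 1 := (PySem.Int.floordiv_lt_iff_lt_mul hk0).mpr (by omega)
      have h2 : 0 ≤ PySem.Int.floordiv n k := (PySem.Int.le_floordiv_iff_mul_le hk0).mpr (by simpa)
      omega
    rw [hq0]
    have hL : pvLarge n s k = [] := by
      unfold pvLarge
      rw [PySem.List.pyRange_one_eq_nil (by nlinarith : s + 1 ≤ k)]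
      rfl
    have hS : pvSmall n (min 0 s) = [] := by
      unfold pvSmall
      rw [PySem.List.pyRange_neg_one_eq_nil (by omega)]
      rfl
    simp [pvJump, hL, hS]
  | succ fuel IH =>
    intro k pairs hk hfuel
    have hk0 : (0:Int) < k := by omega
    by_cases hgo : 1 < PySem.Int.floordiv n k
    · have hq2 : 2 ≤ PySem.Int.floordiv n k := by omega
      have hstep : pvJump n (fuel + 1) k pairs
          = pvJump n fuel (PySem.Int.floordiv n (PySem.Int.floordiv n k) + 1)
              (pairs ++ [[PySem.Int.floordiv n (PySem.Int.floordiv n k),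
                          PySem.Int.floordiv n k,
                          PySem.Int.floordiv n k * PySem.Int.floordiv n (PySem.Int.floordiv n k)]]) := by
        simp only [pvJump, if_pos hgo]
      by_cases hbig : s < PySem.Int.floordiv n k
      · -- large quotient: singleton block, next position k + 1
        have hkm : PySem.Int.floordiv n (PySem.Int.floordiv n k) = k :=
          pv_fd_inv_large hk0 (by omega) hs2 hbig
        have hks : k ≤ s := by
          by_contra h
          have : PySem.Int.floordiv n k * k ≤ n := (PySem.Int.le_floordiv_iff_mul_le hk0).mp le_rfl
          nlinarith
        rw [hstep, hkm, IH (k + 1) _ (by omega) (by push_cast at hfuel ⊢; omega)]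
        -- large part peels its head at d = k
        have hLcons : pvLarge n s k
            = [[k, PySem.Int.floordiv n k, PySem.Int.floordiv n k * k]] ++ pvLarge n s (k + 1) := by
          unfold pvLarge
          rw [PySem.List.pyRange_one_cons (by omega : k < s + 1)]
          simp [if_pos hbig]
        -- small part is unchanged: n // (k+1) is still ≥ s
        have hnext : s ≤ PySem.Int.floordiv n (k + 1) := by
          rcases lt_or_ge k s with hlt | hge
          · -- k + 1 ≤ s : n // (k+1) ≥ n // s ≥ s
            calc s ≤ PySem.Int.floordiv n s :=
                  (PySem.Int.le_floordiv_iff_mul_le (by omega)).mpr hss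
              _ ≤ PySem.Int.floordiv n (k + 1) := pv_fd_antitone hn0 (by omega) (by omega)
          · -- k = s : n // s > s forces n ≥ s (s+1), hence n // (s+1) ≥ s
            have hks' : k = s := by omega
            subst hks'
            have : (k + 1) * k ≤ n := by
              have := (PySem.Int.le_floordiv_iff_mul_le hk0).mp (by omega : k + 1 ≤ PySem.Int.floordiv n k)
              linarith
            exact (PySem.Int.le_floordiv_iff_mul_le (by omega)).mpr (by nlinarith)
        rw [min_eq_right (le_of_lt hbig), min_eq_right hnext, hLcons]
        simp [mul_comm]
      · -- small quotient q ≤ s: large part is empty, small part peels its head at q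
        have hqs : PySem.Int.floordiv n k ≤ s := by omega
        have hm : s ≤ PySem.Int.floordiv n (PySem.Int.floordiv n k) := by
          calc s ≤ PySem.Int.floordiv n s :=
                (PySem.Int.le_floordiv_iff_mul_le (by omega)).mpr hss
            _ ≤ PySem.Int.floordiv n (PySem.Int.floordiv n k) :=
                pv_fd_antitone hn0 (by omega) hqs
        have hknext : k ≤ PySem.Int.floordiv n (PySem.Int.floordiv n k) := pv_le_kmax hk0 hq2
        rw [hstep, IH (PySem.Int.floordiv n (PySem.Int.floordiv n k) + 1) _ (by omega)
              (by push_cast at hfuel ⊢; omega)]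
        have hnextq : PySem.Int.floordiv n (PySem.Int.floordiv n (PySem.Int.floordiv n k) + 1)
            = PySem.Int.floordiv n k - 1 := pv_fd_next_small hq2 hqs hss
        -- both large parts are empty
        have hLk : pvLarge n s k = [] := by
          unfold pvLarge
          rw [List.filterMap_eq_nil_iff]
          intro d hd
          rw [PySem.List.mem_pyRange_one] at hd
          have : PySem.Int.floordiv n d ≤ PySem.Int.floordiv n k :=
            pv_fd_antitone hn0 hk0 hd.1
          rw [if_neg (by omega)]
        have hLk' : pvLarge n s (PySem.Int.floordiv n (PySem.Int.floordiv n k) + 1) = [] := by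
          unfold pvLarge
          rw [PySem.List.pyRange_one_eq_nil (by omega)]
          rfl
        -- small part peels its head
        have hScons : pvSmall n (min (PySem.Int.floordiv n k) s)
            = [[PySem.Int.floordiv n (PySem.Int.floordiv n k), PySem.Int.floordiv n k,
                PySem.Int.floordiv n k * PySem.Int.floordiv n (PySem.Int.floordiv n k)]]
              ++ pvSmall n (min (PySem.Int.floordiv n k - 1) s) := by
          rw [min_eq_left hqs, min_eq_left (by omega)]
          unfold pvSmall
          rw [PySem.List.pyRange_neg_one_cons (by omega : (1:Int) < PySem.Int.floordiv n k)]
          simp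
        rw [hnextq, hLk, hLk', hScons]
        simp
    · -- loop over: q ≤ 1, both comprehensions are empty
      have hq1 : PySem.Int.floordiv n k ≤ 1 := by omega
      have hL : pvLarge n s k = [] := by
        unfold pvLarge
        rw [List.filterMap_eq_nil_iff]
        intro d hd
        rw [PySem.List.mem_pyRange_one] at hd
        have : PySem.Int.floordiv n d ≤ PySem.Int.floordiv n k :=
          pv_fd_antitone hn0 hk0 hd.1
        rw [if_neg (by omega)]
      have hS : pvSmall n (min (PySem.Int.floordiv n k) s) = [] := by
        unfold pvSmall
        rw [PySem.List.pyRange_neg_one_eq_nil (le_trans (min_le_left _ _) hq1)]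
        rfl
      simp [pvJump, if_neg hgo, hL, hS]

-- ===== VERDICT (by name: the statement is the Claim_ definition above) =====
theorem produce_pairs_with_constant_number_of_patterns_spec : Claim_equal_produce_pairs_with_constant_number_of_patterns := by
  intro n _
  unfold Spec_produce_pairs_with_constant_number_of_patterns
  unfold produce_pairs_with_constant_number_of_patterns
  unfold produce_pairs_with_constant_number_of_patterns_alt
  by_cases hn : 2 ≤ n
  · have hnn : ((n.toNat : Int)) = n := Int.toNat_of_nonneg (by omega)
    set s : Int := (Nat.sqrt n.toNat : Int) with hsdef
    have hss : s * s ≤ n := by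
      have h : ((Nat.sqrt n.toNat * Nat.sqrt n.toNat : Nat) : Int) ≤ ((n.toNat : Nat) : Int) :=
        by exact_mod_cast Nat.sqrt_le n.toNat
      push_cast at h
      rw [hnn] at h
      exact h
    have hs2 : n < (s + 1) * (s + 1) := by
      have h : ((n.toNat : Nat) : Int) < (((Nat.sqrt n.toNat + 1) * (Nat.sqrt n.toNat + 1) : Nat) : Int) :=
        by exact_mod_cast Nat.lt_succ_sqrt n.toNat
      push_cast at h
      rw [hnn] at h
      exact h
    have hs1 : 1 ≤ s := by nlinarith
    -- A's first iteration is silent (sl_new = n // 1 = n = sl_old)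
    have step : pvLoopA n (n.toNat + 2) 1 n [] = pvLoopA n (n.toNat + 1) (1 + 1) n [] := by
      show pvLoopA n (n.toNat + 1 + 1) 1 n [] = _
      rw [pvLoopA_succ, if_pos (by omega : n > 1), pv_fd_one,
          if_neg (by simp : ¬ n ≠ n)]
    have main := pvMain n hn (n.toNat + 1) 2 (n.toNat + 2) [] (by omega)
          (by push_cast [hnn]; omega) (by push_cast [hnn]; omega)
    rw [show (2:Int) - 1 = 1 by ring, pv_fd_one] at main
    have inv := pvJumpInv n s hn hs1 hss hs2 (n.toNat + 2) 1 [] (by omega)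
          (by push_cast [hnn]; omega)
    rw [pv_fd_one, min_eq_right (by nlinarith : s ≤ n)] at inv
    rw [step, show (1:Int) + 1 = 2 by norm_num, main, inv,
        if_neg (by omega : ¬ n < 2)]
    rfl
  · -- n ≤ 1: A's loop body never runs; B returns [] at the guard
    have hA : pvLoopA n (n.toNat + 2) 1 n [] = [] := by
      simp [pvLoopA, if_neg (by omega : ¬ n > 1)]
    rw [hA, if_pos (by omega : n < 2)]
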